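-- pv_equiv track=rewrite | github.com/CristianG011/Taller2_LOS_MORATEROS | Punto 3.py | numeros_espejo
-- ===== SOURCE A (Python) =====
-- def numeros_espejo(a, b):         #Definimos la función para hallar números espejo
--     lista1 = []                   #Creamos lista 1 para los dígitos del primer número ingresado
--     while a > 0:
--         digitos_a = a % 10        #Se obtiene el último dígito del primer número
--         a = a // 10               #Se reduce el primer número eliminando el último dígito
--         lista1.append(digitos_a)  #Agrega los dígitos a la lista 1
--
--     lista2 = []                   #Creamos lista 2 para los dígitos del segundo número
--     while b > 0:
--         digitos_b = b % 10        #Se obtiene el último dígito del segundo número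
--         b = b // 10               #Se reduce el segundo número eliminando el último dígito
--         lista2.append(digitos_b)  #Agrega los dígitos a la lista 2
--
--
--     if lista1[:] == lista2[::-1] or lista1[::-1] == lista2[:]:   #Si los dígitos del primer número son iguales a los dígitos del segundo número al revés o viceversa
--         return "Son números espejo"                              #Se trata de números espejo
--     else:
--         return "No son números espejo"
-- ===== SOURCE B (Python) =====
-- def numeros_espejo(a, b):
--     # String-based: compare the decimal representations directly (a <= 0 yields
--     # no digits in A's loop, hence the positivity guard).
--     sa = str(a) if a > 0 else ""
--     sb = str(b) if b > 0 else ""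
--     return "Son números espejo" if sa == sb[::-1] else "No son números espejo"
-- ===== Notes on version B (the rewrite author's own statement) =====
-- stated objective: idiomatic
-- what changed: Replaces the two arithmetic digit-extraction loops and list comparisons by a single comparison of string representations (str(a) against the reverse of str(b)), with no loops.
import Mathlib
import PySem

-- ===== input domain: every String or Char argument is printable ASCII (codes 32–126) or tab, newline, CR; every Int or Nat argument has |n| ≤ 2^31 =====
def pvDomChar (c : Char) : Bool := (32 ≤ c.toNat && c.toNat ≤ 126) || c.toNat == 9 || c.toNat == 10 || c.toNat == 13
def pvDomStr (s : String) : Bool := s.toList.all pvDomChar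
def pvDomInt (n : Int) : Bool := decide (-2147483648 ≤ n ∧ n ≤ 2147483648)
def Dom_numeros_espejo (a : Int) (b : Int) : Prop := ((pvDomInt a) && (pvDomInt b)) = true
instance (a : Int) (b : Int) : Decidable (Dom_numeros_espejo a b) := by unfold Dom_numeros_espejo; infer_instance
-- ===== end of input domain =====

-- B replaces A's two arithmetic digit-extraction loops by one comparison of string representations; objective: idiomatic.

-- ===== PORT A =====
-- A's `while a > 0: lista.append(a % 10); a //= 10` loop, in appended order (least-significant digit first)
def pvDigitsLoop (n : Int) : List Int :=
  if _h : 0 < n then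
    PySem.Int.mod n 10 :: pvDigitsLoop (PySem.Int.floordiv n 10)
  else []
termination_by n.toNat
decreasing_by
  rw [PySem.Int.floordiv_eq_ediv_of_pos (by norm_num)]
  omega

def numeros_espejo (a : Int) (b : Int) : String :=
  let lista1 := pvDigitsLoop a
  let lista2 := pvDigitsLoop b
  -- lista1[:] == lista2[::-1] or lista1[::-1] == lista2  (step -1 ≠ 0, so slice? is always some)
  if PySem.List.slice lista1 none none = (PySem.List.slice? lista2 none none (-1)).getD []
      ∨ (PySem.List.slice? lista1 none none (-1)).getD [] = PySem.List.slice lista2 none none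
  then "Son números espejo" else "No son números espejo"

-- ===== PORT B =====
def numeros_espejo_alt (a : Int) (b : Int) : String :=
  let sa := if 0 < a then PySem.Int.toStr a else ""
  let sb := if 0 < b then PySem.Int.toStr b else ""
  -- sa == sb[::-1]  (step -1 ≠ 0, so slice? is always some)
  if sa = (PySem.Str.slice? sb none none (-1)).getD "" then "Son números espejo"
  else "No son números espejo"

-- ===== PRECONDITION & SPEC =====
def Spec_numeros_espejo (a : Int) (b : Int) (out : String) : Prop := out = numeros_espejo_alt a b
instance (a : Int) (b : Int) (out : String) : Decidable (Spec_numeros_espejo a b out) := by unfold Spec_numeros_espejo; infer_instance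

-- ===== CLAIM (what is proved, stated in full; the proofs are below) =====
def Claim_equal_numeros_espejo : Prop := ∀ (a : Int) (b : Int), Dom_numeros_espejo a b → Spec_numeros_espejo a b (numeros_espejo a b)

-- ===== LEMMAS AND PROOFS =====

-- core of Nat.toDigits, expressed through Nat.digits
lemma pv_toDigitsCore10 : ∀ (fuel n : Nat) (ds : List Char), n < fuel → 0 < n →
    Nat.toDigitsCore 10 fuel n ds = ((Nat.digits 10 n).map Nat.digitChar).reverse ++ ds := by
  intro fuel
  induction fuel with
  | zero => intro n ds h _; omega
  | succ f ih =>
    intro n ds h hn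
    rw [Nat.toDigitsCore]
    have hdig : Nat.digits 10 n = n % 10 :: Nat.digits 10 (n / 10) :=
      Nat.digits_def' (by norm_num) hn
    by_cases h0 : n / 10 = 0
    · simp [h0, hdig]
    · have hlt : n / 10 < f := lt_of_lt_of_le (Nat.div_lt_self hn (by norm_num)) (by omega)
      simp only [h0, if_false]
      rw [ih (n / 10) _ hlt (Nat.pos_of_ne_zero h0), hdig]
      simp

lemma pv_toDigits10 (n : Nat) (hn : 0 < n) :
    Nat.toDigits 10 n = ((Nat.digits 10 n).map Nat.digitChar).reverse := by
  have := pv_toDigitsCore10 (n + 1) n [] (by omega) hn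
  simpa [Nat.toDigits] using this

-- A's digit loop, expressed through Nat.digits
lemma pv_digitsLoop_eq : ∀ (m : Nat) (n : Int), n.toNat = m → 0 < n →
    pvDigitsLoop n = (Nat.digits 10 n.toNat).map Int.ofNat := by
  intro m
  induction m using Nat.strong_induction_on with
  | _ m ih =>
    intro n hm hn
    rw [pvDigitsLoop]
    simp only [hn, dif_pos]
    have hmod : PySem.Int.mod n 10 = n % 10 := PySem.Int.mod_eq_emod_of_pos (by norm_num)
    have hdiv : PySem.Int.floordiv n 10 = n / 10 := PySem.Int.floordiv_eq_ediv_of_pos (by norm_num)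
    have hdig : Nat.digits 10 n.toNat = n.toNat % 10 :: Nat.digits 10 (n.toNat / 10) :=
      Nat.digits_def' (by norm_num) (by omega)
    rw [hdig, List.map_cons]
    have hhead : PySem.Int.mod n 10 = Int.ofNat (n.toNat % 10) := by
      rw [hmod]; show n % 10 = ((n.toNat % 10 : Nat) : Int); omega
    have htailn : (n / 10).toNat = n.toNat / 10 := by omega
    by_cases h0 : 0 < n / 10
    · have := ih ((n / 10).toNat) (by omega) (n / 10) rfl h0
      rw [hhead, hdiv, this, htailn]
    · have hz : n / 10 = 0 := by omega
      have hz' : n.toNat / 10 = 0 := by omega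
      rw [hhead, hdiv, hz, hz']
      rw [pvDigitsLoop]; simp

lemma pv_digitChar_inj (x y : Nat) (hx : x < 10) (hy : y < 10)
    (h : Nat.digitChar x = Nat.digitChar y) : x = y := by
  interval_cases x <;> interval_cases y <;> simp_all [Nat.digitChar]

lemma pv_map_digitChar_inj : ∀ (xs ys : List Nat), (∀ x ∈ xs, x < 10) → (∀ y ∈ ys, y < 10) →
    xs.map Nat.digitChar = ys.map Nat.digitChar → xs = ys := by
  intro xs
  induction xs with
  | nil => intro ys _ _ h; cases ys <;> simp_all
  | cons x t ih =>
    intro ys hxs hys h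
    cases ys with
    | nil => simp_all
    | cons y t' =>
      simp only [List.map_cons, List.cons.injEq] at h
      have hx := pv_digitChar_inj x y (hxs x (by simp)) (hys y (by simp)) h.1
      have ht := ih t' (fun z hz => hxs z (by simp [hz])) (fun z hz => hys z (by simp [hz])) h.2
      simp [hx, ht]

lemma pv_toList_toStr_pos (n : Int) (hn : 0 < n) :
    (PySem.Int.toStr n).toList = ((Nat.digits 10 n.toNat).map Nat.digitChar).reverse := by
  rw [PySem.Int.toList_toStr]
  simp only [PySem.Int.toChars, if_neg (by omega : ¬ n < 0)]
  exact pv_toDigits10 n.toNat (by omega)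

lemma pv_main (a b : Int) : numeros_espejo a b = numeros_espejo_alt a b := by
  unfold numeros_espejo numeros_espejo_alt
  simp only [PySem.List.slice_none_none, PySem.List.slice?_none_none_neg_one,
    PySem.Str.slice?_none_none_neg_one, Option.getD_some]
  have hofNat : Function.Injective Int.ofNat := fun x y h => by
    simpa using congrArg Int.toNat h
  by_cases ha : 0 < a <;> by_cases hb : 0 < b <;>
    simp only [ha, hb, if_pos, if_false]
  · -- both positive: both conditions say digits a = (digits b).reverse
    have h1 := pv_digitsLoop_eq a.toNat a rfl ha
    have h2 := pv_digitsLoop_eq b.toNat b rfl hb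
    have hsa := pv_toList_toStr_pos a ha
    have hsb := pv_toList_toStr_pos b hb
    set da := Nat.digits 10 a.toNat with hda
    set db := Nat.digits 10 b.toNat with hdb
    have hda10 : ∀ d ∈ da.reverse, d < 10 := fun d hd =>
      Nat.digits_lt_base (by norm_num) (List.mem_reverse.mp hd)
    have hdb10 : ∀ d ∈ db, d < 10 := fun d hd => Nat.digits_lt_base (by norm_num) hd
    have hL : (pvDigitsLoop a = (pvDigitsLoop b).reverse ∨
        (pvDigitsLoop a).reverse = pvDigitsLoop b) ↔ da = db.reverse := by
      rw [h1, h2, ← List.map_reverse, ← List.map_reverse,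
        (List.map_injective_iff.mpr hofNat).eq_iff, (List.map_injective_iff.mpr hofNat).eq_iff,
        List.reverse_eq_iff]
      tauto
    have hR : (PySem.Int.toStr a = String.ofList (PySem.Int.toStr b).toList.reverse) ↔
        da = db.reverse := by
      rw [← String.toList_inj, String.toList_ofList, hsa, hsb, List.reverse_reverse,
        ← List.map_reverse]
      constructor
      · exact fun h => List.reverse_eq_iff.mp (pv_map_digitChar_inj da.reverse db hda10 hdb10 h)
      · exact fun h => by rw [h, List.reverse_reverse]
    rw [if_congr (hL.trans hR.symm) rfl rfl]
  · -- a > 0, b ≤ 0: both sides "No"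
    have h1 := pv_digitsLoop_eq a.toNat a rfl ha
    have h2 : pvDigitsLoop b = [] := by rw [pvDigitsLoop]; simp [hb]
    have hne : Nat.digits 10 a.toNat ≠ [] := Nat.digits_ne_nil_iff_ne_zero.mpr (by omega)
    have hsa := pv_toList_toStr_pos a ha
    have hLf : ¬ (pvDigitsLoop a = (pvDigitsLoop b).reverse ∨
        (pvDigitsLoop a).reverse = pvDigitsLoop b) := by
      rw [h1, h2]
      simp [hne]
    have hRf : ¬ (PySem.Int.toStr a = String.ofList ("" : String).toList.reverse) := by
      intro h
      have := congrArg String.toList h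
      rw [String.toList_ofList, hsa] at this
      simp at this
      exact hne this
    rw [if_neg hLf, if_neg hRf]
  · -- a ≤ 0, b > 0: both sides "No"
    have h1 : pvDigitsLoop a = [] := by rw [pvDigitsLoop]; simp [ha]
    have h2 := pv_digitsLoop_eq b.toNat b rfl hb
    have hne : Nat.digits 10 b.toNat ≠ [] := Nat.digits_ne_nil_iff_ne_zero.mpr (by omega)
    have hsb := pv_toList_toStr_pos b hb
    have hLf : ¬ (pvDigitsLoop a = (pvDigitsLoop b).reverse ∨
        (pvDigitsLoop a).reverse = pvDigitsLoop b) := by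
      rw [h1, h2]
      simp [hne]
    have hRf : ¬ (("" : String) = String.ofList (PySem.Int.toStr b).toList.reverse) := by
      intro h
      have := congrArg String.toList h
      rw [String.toList_ofList, hsb] at this
      simp at this
      exact hne this
    rw [if_neg hLf, if_neg hRf]
  · -- both ≤ 0: both sides "Son"
    have h1 : pvDigitsLoop a = [] := by rw [pvDigitsLoop]; simp [ha]
    have h2 : pvDigitsLoop b = [] := by rw [pvDigitsLoop]; simp [hb]
    have hLt : pvDigitsLoop a = (pvDigitsLoop b).reverse ∨
        (pvDigitsLoop a).reverse = pvDigitsLoop b := by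
      rw [h1, h2]; simp
    have hRt : ("" : String) = String.ofList ("" : String).toList.reverse := by
      rw [← String.toList_inj, String.toList_ofList]; simp
    rw [if_pos hLt, if_pos hRt]

-- ===== VERDICT (by name: the statement is the Claim_ definition above) =====
theorem numeros_espejo_spec : Claim_equal_numeros_espejo := by
  intro a b _
  unfold Spec_numeros_espejo
  exact pv_main a b
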